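-- pv_equiv track=rewrite | github.com/g-q-x/vi | code/rename_lower_version.py | patch_to_list
-- ===== SOURCE A (Python) =====
-- def patch_to_list(diffs):
--     list = []
--     list1 = []
--     for line in diffs:
--         line = line.rstrip()
--         if line.startswith('@@'):
--             if list1 == []:
--                 list1.append(line)
--                 continue
--             else:
--                 list.append(list1)
--                 list1 = []
--                 list1.append(line)
--                 continue
--         list1.append(line)
--     list.append(list1)
--     return list
-- ===== SOURCE B (Python) =====
-- def patch_to_list(diffs):
--     stripped = [l.rstrip() for l in diffs]
--     bounds = [i for i, l in enumerate(stripped) if i > 0 and l.startswith('@@')]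
--     groups = []
--     start = 0
--     for b in bounds:
--         groups.append(stripped[start:b])
--         start = b
--     groups.append(stripped[start:])
--     return groups
-- ===== Notes on version B (the rewrite author's own statement) =====
-- stated objective: alternative
-- what changed: B first locates the '@@' boundary indices (skipping index 0) and produces the groups by slicing the stripped list at those indices, instead of A's accumulate-and-flush loop with a current-group buffer.
import Mathlib
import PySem

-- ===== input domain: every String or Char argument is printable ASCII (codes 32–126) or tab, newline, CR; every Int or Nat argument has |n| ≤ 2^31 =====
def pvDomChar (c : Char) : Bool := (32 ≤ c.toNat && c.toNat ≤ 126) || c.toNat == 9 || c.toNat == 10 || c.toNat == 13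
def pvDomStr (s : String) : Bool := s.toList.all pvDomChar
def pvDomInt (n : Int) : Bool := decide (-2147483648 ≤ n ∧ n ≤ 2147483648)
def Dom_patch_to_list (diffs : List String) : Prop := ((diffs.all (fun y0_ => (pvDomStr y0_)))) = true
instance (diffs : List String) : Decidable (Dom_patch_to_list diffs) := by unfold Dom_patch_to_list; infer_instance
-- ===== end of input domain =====

-- B locates the '@@' boundary indices and slices the stripped list there, instead of A's
-- accumulate-and-flush loop; same cost, different decomposition (objective: alternative).

-- ===== PORT A =====
def patch_to_list (diffs : List String) : List (List String) :=
  let r := diffs.foldl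
    (fun (st : List (List String) × List String) line =>
      let line := PySem.Str.rstrip line
      if PySem.Str.startswith line "@@" then
        if st.2 = [] then (st.1, st.2 ++ [line])
        else (st.1 ++ [st.2], [line])
      else (st.1, st.2 ++ [line]))
    ([], [])
  r.1 ++ [r.2]

-- ===== PORT B =====
def patch_to_list_alt (diffs : List String) : List (List String) :=
  let stripped := diffs.map PySem.Str.rstrip
  let bounds := ((PySem.List.enumerate stripped).filter
      (fun p => decide (0 < p.1) && PySem.Str.startswith p.2 "@@")).map (·.1)
  let r := bounds.foldl
    (fun (st : List (List String) × Int) b =>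
      (st.1 ++ [PySem.List.slice stripped (some st.2) (some b)], b)) ([], 0)
  r.1 ++ [PySem.List.slice stripped (some r.2) none]

-- ===== PRECONDITION & SPEC =====
def Spec_patch_to_list (diffs : List String) (out : List (List String)) : Prop := out = patch_to_list_alt diffs
instance (diffs : List String) (out : List (List String)) : Decidable (Spec_patch_to_list diffs out) := by unfold Spec_patch_to_list; infer_instance

-- ===== CLAIM (what is proved, stated in full; the proofs are below) =====
def Claim_equal_patch_to_list : Prop := ∀ (diffs : List String), Dom_patch_to_list diffs → Spec_patch_to_list diffs (patch_to_list diffs)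

-- ===== LEMMAS AND PROOFS =====

-- reference splitter: both ports are reduced to this
def splitGo : List String → List String → List (List String)
  | [], cur => [cur]
  | x :: xs, cur =>
      if PySem.Str.startswith x "@@" = true ∧ cur ≠ [] then cur :: splitGo xs [x]
      else splitGo xs (cur ++ [x])

-- proof-side names for the two phases of port B
def boundsOf (xs : List String) (k : Int) : List Int :=
  ((PySem.List.enumerate xs k).filter
      (fun p => decide (0 < p.1) && PySem.Str.startswith p.2 "@@")).map (·.1)

def chunksFold (s : List String) (bnds : List Int) (acc : List (List String)) (start : Int) :
    List (List String) :=
  let r := bnds.foldl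
    (fun (st : List (List String) × Int) b =>
      (st.1 ++ [PySem.List.slice s (some st.2) (some b)], b)) (acc, start)
  r.1 ++ [PySem.List.slice s (some r.2) none]

theorem alt_eq_chunksFold (diffs : List String) :
    patch_to_list_alt diffs
      = chunksFold (diffs.map PySem.Str.rstrip)
          (boundsOf (diffs.map PySem.Str.rstrip) 0) [] 0 := rfl

theorem boundsOf_nil (k : Int) : boundsOf [] k = [] := by
  simp [boundsOf, PySem.List.enumerate]

theorem boundsOf_cons (y : String) (ys : List String) (k : Int) :
    boundsOf (y :: ys) k
      = if (decide (0 < k) && PySem.Str.startswith y "@@") = true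
          then k :: boundsOf ys (k + 1) else boundsOf ys (k + 1) := by
  simp only [boundsOf, PySem.List.enumerate_cons, List.filter_cons]
  split <;> simp

theorem chunksFold_nil (s : List String) (acc : List (List String)) (start : Int) :
    chunksFold s [] acc start = acc ++ [PySem.List.slice s (some start) none] := by
  simp [chunksFold]

theorem chunksFold_cons (s : List String) (b : Int) (bs : List Int)
    (acc : List (List String)) (start : Int) :
    chunksFold s (b :: bs) acc start
      = chunksFold s bs (acc ++ [PySem.List.slice s (some start) (some b)]) b := by
  simp [chunksFold]

theorem a_foldl_eq_splitGo (xs : List String) (acc : List (List String)) (cur : List String) :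
    (xs.foldl
        (fun (st : List (List String) × List String) line =>
          let line := PySem.Str.rstrip line
          if PySem.Str.startswith line "@@" then
            if st.2 = [] then (st.1, st.2 ++ [line])
            else (st.1 ++ [st.2], [line])
          else (st.1, st.2 ++ [line])) (acc, cur)).1
      ++ [(xs.foldl
        (fun (st : List (List String) × List String) line =>
          let line := PySem.Str.rstrip line
          if PySem.Str.startswith line "@@" then
            if st.2 = [] then (st.1, st.2 ++ [line])
            else (st.1 ++ [st.2], [line])
          else (st.1, st.2 ++ [line])) (acc, cur)).2]
    = acc ++ splitGo (xs.map PySem.Str.rstrip) cur := by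
  induction xs generalizing acc cur with
  | nil => simp [splitGo]
  | cons x xs ih =>
    simp only [List.foldl_cons, List.map_cons, splitGo]
    by_cases hp : PySem.Str.startswith (PySem.Str.rstrip x) "@@" = true
    · by_cases hc : cur = []
      · subst hc
        conv_lhs => rw [if_pos hp, if_pos rfl]
        conv_rhs => rw [if_neg (fun h => h.2 rfl)]
        exact ih acc ([] ++ [PySem.Str.rstrip x])
      · conv_lhs => rw [if_pos hp, if_neg hc]
        conv_rhs => rw [if_pos ⟨hp, hc⟩]
        rw [show acc ++ (cur :: splitGo (xs.map PySem.Str.rstrip) [PySem.Str.rstrip x])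
              = (acc ++ [cur]) ++ splitGo (xs.map PySem.Str.rstrip) [PySem.Str.rstrip x] by
            simp]
        exact ih (acc ++ [cur]) [PySem.Str.rstrip x]
    · conv_lhs => rw [if_neg hp]
      conv_rhs => rw [if_neg (fun h => hp h.1)]
      exact ih acc (cur ++ [PySem.Str.rstrip x])

theorem b_key (xs : List String) : ∀ (s : List String) (start k : Nat)
    (acc : List (List String)), start < k → s.drop k = xs →
    chunksFold s (boundsOf xs (k : Int)) acc (start : Int)
      = acc ++ splitGo xs ((s.drop start).take (k - start)) := by
  induction xs with
  | nil =>
    intro s start k acc hlt hdrop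
    have hk : s.length ≤ k := by
      by_contra h
      have := List.drop_eq_nil_iff.mp hdrop
      omega
    have h1 : (s.drop start).take (k - start) = s.drop start := by
      apply List.take_of_length_le
      simp
      omega
    rw [boundsOf_nil, chunksFold_nil, PySem.List.slice_from_natCast, h1, splitGo]
  | cons y ys ih =>
    intro s start k acc hlt hdrop
    have hklen : k < s.length := by
      by_contra h
      rw [List.drop_eq_nil_iff.mpr (by omega)] at hdrop
      exact List.cons_ne_nil _ _ hdrop.symm
    have hdrop' : s.drop (k + 1) = ys := by
      have := congrArg List.tail hdrop
      simpa [List.tail_drop] using this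
    have hcast : ((k : Int) + 1) = ((k + 1 : Nat) : Int) := by push_cast; ring
    have hpos : (decide ((0:Int) < (k:Int))) = true := by
      simp
      omega
    rw [boundsOf_cons, hpos, Bool.true_and]
    by_cases hp : PySem.Str.startswith y "@@" = true
    · -- boundary at k: flush the current slice
      rw [if_pos hp, chunksFold_cons, hcast,
        ih s k (k + 1) (acc ++ [PySem.List.slice s (some (start:Int)) (some (k:Int))])
          (by omega) hdrop']
      have hcur : PySem.List.slice s (some (start:Int)) (some (k:Int))
          = (s.drop start).take (k - start) := PySem.List.slice_natCast s start k
      have htake1 : (s.drop k).take (k + 1 - k) = [y] := by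
        rw [hdrop]
        simp
      have hne : (s.drop start).take (k - start) ≠ [] := by
        intro h
        rcases List.take_eq_nil_iff.mp h with h1 | h1 <;>
          first
            | omega
            | (have := List.drop_eq_nil_iff.mp h1; omega)
      rw [htake1, hcur]
      conv_rhs => rw [splitGo]
      rw [if_pos ⟨hp, hne⟩]
      simp [List.append_assoc]
    · rw [if_neg hp, hcast, ih s start (k + 1) acc (by omega) hdrop']
      have hstep : (s.drop start).take (k + 1 - start)
          = (s.drop start).take (k - start) ++ [y] := by
        have h1 : k + 1 - start = (k - start) + 1 := by omega
        rw [h1, List.take_add]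
        have h2 : (s.drop start).drop (k - start) = s.drop k := by
          rw [List.drop_drop]
          congr 1
          omega
        rw [h2, hdrop]
        simp
      conv_rhs => rw [splitGo]
      rw [if_neg (fun h => hp h.1), hstep]

theorem a_eq_splitGo (diffs : List String) :
    patch_to_list diffs = splitGo (diffs.map PySem.Str.rstrip) [] := by
  exact a_foldl_eq_splitGo diffs [] []

theorem b_eq_splitGo (diffs : List String) :
    patch_to_list_alt diffs = splitGo (diffs.map PySem.Str.rstrip) [] := by
  rw [alt_eq_chunksFold]
  cases hs : diffs.map PySem.Str.rstrip with
  | nil =>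
    rw [boundsOf_nil, chunksFold_nil, splitGo]
    simp [PySem.List.slice]
  | cons x xs =>
    rw [boundsOf_cons]
    rw [if_neg (by simp)]
    rw [show ((0:Int) + 1) = ((1:Nat):Int) by norm_num,
      show (0:Int) = ((0:Nat):Int) by norm_num,
      b_key xs (x :: xs) 0 1 [] (by omega) (by simp)]
    conv_rhs => rw [splitGo]
    rw [if_neg (fun h => h.2 rfl)]
    simp

-- ===== VERDICT (by name: the statement is the Claim_ definition above) =====
theorem patch_to_list_spec : Claim_equal_patch_to_list := by
  intro diffs _
  unfold Spec_patch_to_list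
  rw [a_eq_splitGo, b_eq_splitGo]
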